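-- pv_equiv track=rewrite | github.com/K4H3NY4/social-tracker | app.py | count_instagram_content_types
-- ===== SOURCE A (Python) =====
-- def count_instagram_content_types(posts: list) -> dict:
--     """
--     Count Instagram posts by content_type field
--     - Carousel
--     - Image
--     - Video (includes Reel, Video, Animation)
--     """
--     carousel_count = 0
--     image_count = 0
--     video_count = 0
--
--     for post in posts:
--         content_type = post.get('content_type', '').strip().lower()
--
--         if content_type in ['carousel', 'carousels', 'album']:
--             carousel_count += 1
--         elif content_type in ['image', 'images', 'photo', 'photos', 'picture']:
--             image_count += 1
--         elif content_type in ['video', 'videos', 'reel', 'reels', 'vid', 'vids',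
--                               'animation', 'animations', 'animated', 'anim', 'anims']:
--             video_count += 1
--         else:
--             image_count += 1  # Default to image if unknown
--
--     return {
--         'carousel': carousel_count,
--         'image': image_count,
--         'video': video_count,
--         'total': carousel_count + image_count + video_count
--     }
-- ===== SOURCE B (Python) =====
-- # Different decomposition: no per-item classification / default branch at all.
-- # Normalize once, count only carousel and video keywords in two staged passes,
-- # and derive image by arithmetic complement (everything else defaults to image).
-- CAR = {'carousel', 'carousels', 'album'}
-- VID = {'video', 'videos', 'reel', 'reels', 'vid', 'vids',
--        'animation', 'animations', 'animated', 'anim', 'anims'}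
--
-- def count_instagram_content_types(posts: list) -> dict:
--     cts = [post.get('content_type', '').strip().lower() for post in posts]
--     carousel = sum(ct in CAR for ct in cts)
--     video = sum(ct in VID for ct in cts)
--     return {
--         'carousel': carousel,
--         'image': len(posts) - carousel - video,
--         'video': video,
--         'total': len(posts),
--     }
-- ===== Notes on version B (the rewrite author's own statement) =====
-- stated objective: simpler
-- what changed: Drops the if/elif/else classification and the three running counters entirely: B normalizes once, counts only carousel and video keywords in two staged passes, and derives the image count (including the unknown-defaults) as len(posts) - carousel - video, with total = len(posts).
import Mathlib
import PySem

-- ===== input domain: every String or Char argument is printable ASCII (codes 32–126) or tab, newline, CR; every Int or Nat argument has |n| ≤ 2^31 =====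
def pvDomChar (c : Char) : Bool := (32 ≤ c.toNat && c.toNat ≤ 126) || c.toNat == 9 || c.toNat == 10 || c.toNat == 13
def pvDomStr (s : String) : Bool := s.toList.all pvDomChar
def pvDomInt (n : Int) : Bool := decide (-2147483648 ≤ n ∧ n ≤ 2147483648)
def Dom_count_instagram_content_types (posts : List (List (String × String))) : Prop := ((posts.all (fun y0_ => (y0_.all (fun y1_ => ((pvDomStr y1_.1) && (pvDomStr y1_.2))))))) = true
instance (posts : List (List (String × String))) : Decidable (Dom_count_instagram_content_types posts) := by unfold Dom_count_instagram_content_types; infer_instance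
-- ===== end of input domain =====

-- B drops A's if/elif/else classification: it counts only carousel and video keywords in
-- two staged passes and derives image = len - carousel - video (objective: simpler; same O(n)).


-- ===== PORT A =====
def count_instagram_content_types (posts : List (List (String × String))) : List (String × Int) :=
  let s := posts.foldl (fun (s : Int × Int × Int) post =>
    let ct := PySem.Str.lower (PySem.Str.strip ((PySem.Dict.ofList post).getD "content_type" ""))
    if ct ∈ (["carousel", "carousels", "album"] : List String) then (s.1 + 1, s.2.1, s.2.2)
    else if ct ∈ (["image", "images", "photo", "photos", "picture"] : List String) then (s.1, s.2.1 + 1, s.2.2)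
    else if ct ∈ (["video", "videos", "reel", "reels", "vid", "vids", "animation", "animations", "animated", "anim", "anims"] : List String) then (s.1, s.2.1, s.2.2 + 1)
    else (s.1, s.2.1 + 1, s.2.2)) (0, 0, 0)
  [("carousel", s.1), ("image", s.2.1), ("video", s.2.2), ("total", s.1 + s.2.1 + s.2.2)]

-- ===== PORT B =====
def pvCAR : PySem.Set String := PySem.Set.ofList ["carousel", "carousels", "album"]
def pvVID : PySem.Set String := PySem.Set.ofList
  ["video", "videos", "reel", "reels", "vid", "vids",
   "animation", "animations", "animated", "anim", "anims"]

def count_instagram_content_types_alt (posts : List (List (String × String))) : List (String × Int) :=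
  let cts := posts.map (fun post =>
    PySem.Str.lower (PySem.Str.strip ((PySem.Dict.ofList post).getD "content_type" "")))
  let carousel : Int := cts.countP (fun ct => decide (ct ∈ pvCAR))
  let video : Int := cts.countP (fun ct => decide (ct ∈ pvVID))
  [("carousel", carousel),
   ("image", (posts.length : Int) - carousel - video),
   ("video", video),
   ("total", (posts.length : Int))]

-- ===== PRECONDITION & SPEC =====
def Spec_count_instagram_content_types (posts : List (List (String × String))) (out : List (String × Int)) : Prop := out = count_instagram_content_types_alt posts
instance (posts : List (List (String × String))) (out : List (String × Int)) : Decidable (Spec_count_instagram_content_types posts out) := by unfold Spec_count_instagram_content_types; infer_instance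

-- ===== CLAIM (what is proved, stated in full; the proofs are below) =====
def Claim_equal_count_instagram_content_types : Prop := ∀ (posts : List (List (String × String))), Dom_count_instagram_content_types posts → Spec_count_instagram_content_types posts (count_instagram_content_types posts)

-- ===== LEMMAS AND PROOFS =====

lemma car_set : (pvCAR : List String) = ["carousel", "carousels", "album"] := by decide

lemma vid_set : (pvVID : List String) =
    ["video", "videos", "reel", "reels", "vid", "vids",
     "animation", "animations", "animated", "anim", "anims"] := by decide

lemma img_not_vid (ct : String)
    (h : ct ∈ (["image", "images", "photo", "photos", "picture"] : List String)) :
    ct ∉ (["video", "videos", "reel", "reels", "vid", "vids", "animation", "animations", "animated", "anim", "anims"] : List String) := by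
  fin_cases h <;> decide

lemma car_not_vid (ct : String)
    (h : ct ∈ (["carousel", "carousels", "album"] : List String)) :
    ct ∉ (["video", "videos", "reel", "reels", "vid", "vids", "animation", "animations", "animated", "anim", "anims"] : List String) := by
  fin_cases h <;> decide

set_option maxHeartbeats 1000000 in
lemma foldA_eq (posts : List (List (String × String))) : ∀ (c i v : Int),
    posts.foldl (fun (s : Int × Int × Int) post =>
      let ct := PySem.Str.lower (PySem.Str.strip ((PySem.Dict.ofList post).getD "content_type" ""))
      if ct ∈ (["carousel", "carousels", "album"] : List String) then (s.1 + 1, s.2.1, s.2.2)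
      else if ct ∈ (["image", "images", "photo", "photos", "picture"] : List String) then (s.1, s.2.1 + 1, s.2.2)
      else if ct ∈ (["video", "videos", "reel", "reels", "vid", "vids", "animation", "animations", "animated", "anim", "anims"] : List String) then (s.1, s.2.1, s.2.2 + 1)
      else (s.1, s.2.1 + 1, s.2.2)) (c, i, v)
    = (let cts := posts.map (fun post =>
         PySem.Str.lower (PySem.Str.strip ((PySem.Dict.ofList post).getD "content_type" "")));
       let C : Int := cts.countP (fun ct => decide (ct ∈ (["carousel", "carousels", "album"] : List String)));
       let V : Int := cts.countP (fun ct => decide (ct ∈ (["video", "videos", "reel", "reels", "vid", "vids", "animation", "animations", "animated", "anim", "anims"] : List String)));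
       (c + C, i + ((posts.length : Int) - C - V), v + V)) := by
  induction posts with
  | nil => intro c i v; simp
  | cons p t ih =>
    intro c i v
    by_cases h1 : PySem.Str.lower (PySem.Str.strip ((PySem.Dict.ofList p).getD "content_type" "")) ∈ (["carousel", "carousels", "album"] : List String)
    · have hv := car_not_vid _ h1
      simp only [List.foldl_cons, List.map_cons, List.countP_cons, List.length_cons, ih,
        h1, hv, if_true, if_false, decide_true, decide_false, eq_self_iff_true,
        Prod.mk.injEq]
      push_cast; omega
    · by_cases h2 : PySem.Str.lower (PySem.Str.strip ((PySem.Dict.ofList p).getD "content_type" "")) ∈ (["image", "images", "photo", "photos", "picture"] : List String)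
      · have hv := img_not_vid _ h2
        simp only [List.foldl_cons, List.map_cons, List.countP_cons, List.length_cons, ih,
          h1, h2, hv, if_true, if_false, decide_true, decide_false, eq_self_iff_true,
          Prod.mk.injEq]
        push_cast; omega
      · by_cases h3 : PySem.Str.lower (PySem.Str.strip ((PySem.Dict.ofList p).getD "content_type" "")) ∈ (["video", "videos", "reel", "reels", "vid", "vids", "animation", "animations", "animated", "anim", "anims"] : List String)
        · simp only [List.foldl_cons, List.map_cons, List.countP_cons, List.length_cons, ih,
            h1, h2, h3, if_true, if_false, decide_true, decide_false, eq_self_iff_true,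
            Prod.mk.injEq]
          push_cast; omega
        · simp only [List.foldl_cons, List.map_cons, List.countP_cons, List.length_cons, ih,
            h1, h2, h3, if_true, if_false, decide_true, decide_false, eq_self_iff_true,
            Prod.mk.injEq]
          push_cast; omega

-- ===== VERDICT (by name: the statement is the Claim_ definition above) =====
theorem count_instagram_content_types_spec : Claim_equal_count_instagram_content_types := by
  intro posts _
  show _ = _
  unfold count_instagram_content_types count_instagram_content_types_alt
  simp only [foldA_eq, car_set, vid_set]
  ring
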